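-- pv_equiv track=rewrite | github.com/ASChampOmega/ResumeReader | All_Functions.py | move_front
-- ===== SOURCE A (Python) =====
-- def move_front(s, i, last_char, last_idx):
--   s1 = ""
--   i += 1
--   while(i < len(s) and i < last_idx):
--     if(s[i] in last_char):
--       break;
--     s1 += s[i]
--     i += 1
--   return s1
-- ===== SOURCE B (Python) =====
-- def move_front(s, i, last_char, last_idx):
--     start = i + 1
--     stop = min(len(s), last_idx)
--     j = start
--     while j < stop and s[j] not in last_char:
--         j += 1
--     return s[start:j]
-- ===== Notes on version B (the rewrite author's own statement) =====
-- stated objective: simpler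
-- what changed: A builds the result character by character inside the scan loop; B first finds the boundary index j (first position in [i+1, min(len(s), last_idx)) holding a char of last_char) and returns the single slice s[i+1:j].
-- intended difference: For -len(s) <= i+1 < 0 with last_idx >= 0 and no boundary char in s[i+1:], A's negative indexing wraps past the end of s and returns the tail of s followed by a re-scan from the front (e.g. 'bab' for s='ab', i=-2), while B returns the plain Python slice s[i+1:j] ('b' there); B's value is intended because the wrap-around re-read is an accident of Python negative indexing. — e.g. on move_front("ab", -2, "", 5): A returns "bab", B returns "b"
import Mathlib
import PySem

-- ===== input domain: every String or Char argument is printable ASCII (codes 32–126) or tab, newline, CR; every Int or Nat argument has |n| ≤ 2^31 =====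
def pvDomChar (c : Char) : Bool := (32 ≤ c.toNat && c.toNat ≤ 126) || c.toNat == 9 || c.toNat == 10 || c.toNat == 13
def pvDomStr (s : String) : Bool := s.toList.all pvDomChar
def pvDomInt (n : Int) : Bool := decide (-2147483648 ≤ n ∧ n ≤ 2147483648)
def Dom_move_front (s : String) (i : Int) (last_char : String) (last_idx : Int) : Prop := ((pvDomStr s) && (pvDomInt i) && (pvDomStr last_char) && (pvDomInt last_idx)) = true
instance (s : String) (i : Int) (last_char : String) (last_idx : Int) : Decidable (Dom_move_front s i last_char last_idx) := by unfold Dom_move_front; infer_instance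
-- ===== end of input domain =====

-- B replaces A's character-accumulating while loop by a boundary-index search followed by a single slice s[i+1:j] (objective: simpler).

-- ===== PORT A =====
-- A's while loop: at each step checks i < len(s) and i < last_idx, reads s[i] by Python
-- indexing (negative i reads from the end; PySem.List.pyGet? is exact, none = IndexError,
-- on which the loop result is never returned in Python — such inputs are outside Pre_),
-- breaks when s[i] is in last_char (s[i] is a single char, so Python's substring test
-- `s[i] in last_char` is exactly char membership), otherwise appends s[i] to the accumulator.
def mfScanA (s lc : List Char) (lidx : Int) (j : Int) (acc : List Char) : List Char :=
  if h : j < (s.length : Int) ∧ j < lidx then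
    match PySem.List.pyGet? s j with
    | none => acc          -- Python raises IndexError here; outside Pre_
    | some c => if c ∈ lc then acc else mfScanA s lc lidx (j + 1) (acc ++ [c])
  else acc
termination_by ((min (s.length : Int) lidx) - j).toNat
decreasing_by omega

def move_front (s : String) (i : Int) (last_char : String) (last_idx : Int) : String :=
  String.ofList (mfScanA s.toList last_char.toList last_idx (i + 1) [])

-- ===== PORT B =====
-- B's while loop: advance j while j < stop and s[j] not in last_char; returns the final j.
def mfFindB (s lc : List Char) (stop : Int) (j : Int) : Int :=
  if h : j < stop then
    match PySem.List.pyGet? s j with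
    | none => j            -- Python raises IndexError here; outside Pre_
    | some c => if c ∈ lc then j else mfFindB s lc stop (j + 1)
  else j
termination_by (stop - j).toNat
decreasing_by omega

def move_front_alt (s : String) (i : Int) (last_char : String) (last_idx : Int) : String :=
  let start := i + 1
  let stop := min (s.toList.length : Int) last_idx
  let j := mfFindB s.toList last_char.toList stop start
  String.ofList (PySem.List.slice s.toList (some start) (some j))

-- ===== PRECONDITION & SPEC =====
-- Pre_ excludes exactly the inputs where A raises IndexError (i+1 < -len(s) with the loop
-- entered, i.e. i+1 < last_idx); B raises there too.
def Pre_move_front (s : String) (i : Int) (last_char : String) (last_idx : Int) : Prop :=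
  -(s.toList.length : Int) ≤ i + 1 ∨ last_idx ≤ i + 1
instance (s : String) (i : Int) (last_char : String) (last_idx : Int) : Decidable (Pre_move_front s i last_char last_idx) := by unfold Pre_move_front; infer_instance

def pvWitness_move_front : String × Int × String × Int := ("abc", 0, "b", 9)

-- On inputs with -len(s) ≤ i+1 < 0, last_idx ≥ 0 and no boundary char in s[i+1:], A's
-- negative indexing wraps past the end of s and returns the tail of s followed by a re-scan
-- from the front, while B returns the plain slice s[i+1:j]; B's value is the intended one
-- because the wrap-around re-read is an accident of Python's negative indexing.
def D_move_front (s : String) (i : Int) (last_char : String) (last_idx : Int) : Prop :=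
  -(s.toList.length : Int) ≤ i + 1 ∧ i + 1 < 0 ∧ 0 ≤ last_idx ∧
    ∀ c ∈ s.toList.drop ((s.toList.length : Int) + (i + 1)).toNat, c ∉ last_char.toList
instance (s : String) (i : Int) (last_char : String) (last_idx : Int) : Decidable (D_move_front s i last_char last_idx) := by unfold D_move_front; infer_instance

def Spec_move_front (s : String) (i : Int) (last_char : String) (last_idx : Int) (out : String) : Prop := ¬ D_move_front s i last_char last_idx → out = move_front_alt s i last_char last_idx
instance (s : String) (i : Int) (last_char : String) (last_idx : Int) (out : String) : Decidable (Spec_move_front s i last_char last_idx out) := by unfold Spec_move_front; infer_instance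

def pvDiffWitness_move_front : String × Int × String × Int := ("ab", -2, "", 5)
def pvDiffWitnessOut_move_front : String × String := ("bab", "b")

-- ===== CLAIM (what is proved, stated in full; the proofs are below) =====
def Claim_unchanged_move_front : Prop := ∀ (s : String) (i : Int) (last_char : String) (last_idx : Int), Dom_move_front s i last_char last_idx → Pre_move_front s i last_char last_idx → Spec_move_front s i last_char last_idx (move_front s i last_char last_idx)
def Claim_changed_move_front : Prop := Dom_move_front (pvDiffWitness_move_front.1) (pvDiffWitness_move_front.2.1) (pvDiffWitness_move_front.2.2.1) (pvDiffWitness_move_front.2.2.2) ∧ Pre_move_front (pvDiffWitness_move_front.1) (pvDiffWitness_move_front.2.1) (pvDiffWitness_move_front.2.2.1) (pvDiffWitness_move_front.2.2.2) ∧ D_move_front (pvDiffWitness_move_front.1) (pvDiffWitness_move_front.2.1) (pvDiffWitness_move_front.2.2.1) (pvDiffWitness_move_front.2.2.2) ∧ move_front (pvDiffWitness_move_front.1) (pvDiffWitness_move_front.2.1) (pvDiffWitness_move_front.2.2.1) (pvDiffWitness_move_front.2.2.2) = pvDiffWitnessOut_move_front.1 ∧ move_front_alt (pvDiffWitness_move_front.1)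 (pvDiffWitness_move_front.2.1) (pvDiffWitness_move_front.2.2.1) (pvDiffWitness_move_front.2.2.2) = pvDiffWitnessOut_move_front.2 ∧ pvDiffWitnessOut_move_front.1 ≠ pvDiffWitnessOut_move_front.2

def Claim_exact_move_front : Prop := ∀ (s : String) (i : Int) (last_char : String) (last_idx : Int), Dom_move_front s i last_char last_idx → Pre_move_front s i last_char last_idx → D_move_front s i last_char last_idx → move_front s i last_char last_idx ≠ move_front_alt s i last_char last_idx

-- ===== LEMMAS AND PROOFS =====

-- s[a:a] is empty.
lemma slice_self (xs : List Char) (a : Int) :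
    PySem.List.slice xs (some a) (some a) = [] := by
  simp [PySem.List.slice]

-- Python indexing, in range: the value pyGet? returns.
lemma pyGet?_of_lt (xs : List Char) (j : Int) (h0 : 0 ≤ j) (h1 : j < (xs.length : Int)) :
    PySem.List.pyGet? xs j = xs[j.toNat]? := by
  simp only [PySem.List.pyGet?, PySem.List.pyIdx?]
  rw [if_pos h0, if_pos h1]
  rfl

lemma pyGet?_of_neg (xs : List Char) (j : Int) (h0 : -(xs.length : Int) ≤ j) (h1 : j < 0) :
    PySem.List.pyGet? xs j = xs[((xs.length : Int) + j).toNat]? := by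
  simp only [PySem.List.pyGet?, PySem.List.pyIdx?]
  rw [if_neg (by omega), if_pos h0]
  have : xs.length - (-j).toNat = ((xs.length : Int) + j).toNat := by omega
  rw [this]
  rfl

-- pyGet? succeeding pins the index inside the valid range.
lemma pyGet?_lt_of_nonneg (xs : List Char) (j : Int) (c : Char)
    (hget : PySem.List.pyGet? xs j = some c) (h0 : 0 ≤ j) : j < (xs.length : Int) := by
  by_contra h
  simp only [PySem.List.pyGet?, PySem.List.pyIdx?] at hget
  rw [if_pos h0, if_neg (by omega)] at hget
  simp at hget

lemma pyGet?_ge_of_neg (xs : List Char) (j : Int) (c : Char)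
    (hget : PySem.List.pyGet? xs j = some c) (h1 : j < 0) : -(xs.length : Int) ≤ j := by
  by_contra h
  simp only [PySem.List.pyGet?, PySem.List.pyIdx?] at hget
  rw [if_neg (by omega), if_neg (by omega)] at hget
  simp at hget

-- Peeling one element off the front of a slice, both in the all-nonnegative and the
-- all-negative index regime.
lemma slice_cons (xs : List Char) (j m : Int) (c : Char)
    (hget : PySem.List.pyGet? xs j = some c) (hjm : j < m) (hsign : 0 ≤ j ∨ m < 0) :
    PySem.List.slice xs (some j) (some m) = c :: PySem.List.slice xs (some (j + 1)) (some m) := by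
  obtain ⟨k, hk, hxk, ha, ha1, hb⟩ : ∃ k : Nat, k < xs.length ∧ xs[k]? = some c ∧
      PySem.List.clampIdx xs.length j = k ∧ PySem.List.clampIdx xs.length (j + 1) = k + 1 ∧
      k + 1 ≤ PySem.List.clampIdx xs.length m := by
    rcases hsign with h0 | hm
    · have hjlen : j < (xs.length : Int) := pyGet?_lt_of_nonneg xs j c hget h0
      refine ⟨j.toNat, by omega, by rw [pyGet?_of_lt xs j h0 hjlen] at hget; exact hget, ?_, ?_, ?_⟩
      · unfold PySem.List.clampIdx; rw [if_neg (by omega)]; omega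
      · unfold PySem.List.clampIdx; rw [if_neg (by omega)]; omega
      · unfold PySem.List.clampIdx; rw [if_neg (by omega)]; omega
    · have hj0 : j < 0 := by omega
      have hjlen : -(xs.length : Int) ≤ j := pyGet?_ge_of_neg xs j c hget hj0
      refine ⟨((xs.length : Int) + j).toNat, by omega,
        by rw [pyGet?_of_neg xs j hjlen hj0] at hget; exact hget, ?_, ?_, ?_⟩
      · unfold PySem.List.clampIdx; rw [if_pos hj0, if_neg (by omega)]
      · unfold PySem.List.clampIdx; rw [if_pos (by omega : j + 1 < 0), if_neg (by omega)]; omega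
      · unfold PySem.List.clampIdx; rw [if_pos hm, if_neg (by omega)]; omega
  simp only [PySem.List.slice, ha, ha1]
  rw [List.drop_eq_getElem_cons hk]
  have hsplit : PySem.List.clampIdx xs.length m - k
      = (PySem.List.clampIdx xs.length m - (k + 1)) + 1 := by omega
  rw [hsplit, List.take_succ_cons]
  obtain ⟨_, hxkeq⟩ := List.getElem?_eq_some_iff.mp hxk
  rw [hxkeq]

-- One-step evaluation lemmas for B's search.
lemma mfFindB_idle (s lc : List Char) (stop j : Int) (h : ¬ j < stop) :
    mfFindB s lc stop j = j := by
  rw [mfFindB, dif_neg h]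

lemma mfFindB_break (s lc : List Char) (stop j : Int) (c : Char) (h : j < stop)
    (hc : PySem.List.pyGet? s j = some c) (hmem : c ∈ lc) : mfFindB s lc stop j = j := by
  rw [mfFindB, dif_pos h, hc]
  simp only [if_pos hmem]

lemma mfFindB_step (s lc : List Char) (stop j : Int) (c : Char) (h : j < stop)
    (hc : PySem.List.pyGet? s j = some c) (hmem : c ∉ lc) :
    mfFindB s lc stop j = mfFindB s lc stop (j + 1) := by
  rw [mfFindB, dif_pos h, hc]
  simp only [if_neg hmem]

-- B's search never moves backwards,
lemma mfFindB_ge (s lc : List Char) (stop : Int) : ∀ j, j ≤ mfFindB s lc stop j := by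
  intro j
  induction j using mfFindB.induct (s := s) (lc := lc) (stop := stop) with
  | case1 j h hc =>
    rw [mfFindB, dif_pos h, hc]
  | case2 j h c hc hmem =>
    rw [mfFindB_break s lc stop j c h hc hmem]
  | case3 j h c hc hmem ih =>
    rw [mfFindB_step s lc stop j c h hc hmem]
    omega
  | case4 j h =>
    rw [mfFindB_idle s lc stop j h]

-- and never beyond stop (when it starts at or before stop).
lemma mfFindB_le (s lc : List Char) (stop : Int) : ∀ j, j ≤ stop → mfFindB s lc stop j ≤ stop := by
  intro j
  induction j using mfFindB.induct (s := s) (lc := lc) (stop := stop) with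
  | case1 j h hc =>
    intro hj
    rw [mfFindB, dif_pos h, hc]
    exact hj
  | case2 j h c hc hmem =>
    intro hj
    rw [mfFindB_break s lc stop j c h hc hmem]
    exact hj
  | case3 j h c hc hmem ih =>
    intro hj
    rw [mfFindB_step s lc stop j c h hc hmem]
    exact ih (by omega)
  | case4 j h =>
    intro hj
    rw [mfFindB_idle s lc stop j h]
    exact hj

-- If a boundary char occurs among the tail positions s[len+j:], the search stops at a
-- negative index.
lemma mfFindB_neg (s lc : List Char) (stop : Int) :
    ∀ j, -(s.length : Int) ≤ j → j < 0 →
      (∃ c ∈ s.drop ((s.length : Int) + j).toNat, c ∈ lc) → mfFindB s lc stop j < 0 := by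
  intro j
  induction j using mfFindB.induct (s := s) (lc := lc) (stop := stop) with
  | case1 j h hc =>
    intro h0 h1 _
    rw [pyGet?_of_neg s j h0 h1, List.getElem?_eq_getElem (by omega)] at hc
    simp at hc
  | case2 j h c hc hmem =>
    intro h0 h1 _
    rw [mfFindB_break s lc stop j c h hc hmem]
    exact h1
  | case3 j h c hc hmem ih =>
    intro h0 h1 hex
    rw [mfFindB_step s lc stop j c h hc hmem]
    have hkn : ((s.length : Int) + j).toNat < s.length := by omega
    rw [List.drop_eq_getElem_cons hkn] at hex
    rw [pyGet?_of_neg s j h0 h1, List.getElem?_eq_getElem hkn] at hc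
    obtain ⟨c', hc', hmem'⟩ := hex
    rcases List.mem_cons.mp hc' with rfl | hc'
    · exact absurd hmem' (by rw [← Option.some_inj.mp hc] at hmem; exact hmem)
    · have hne : s.drop (((s.length : Int) + j).toNat + 1) ≠ [] := List.ne_nil_of_mem hc'
      have hlt : ((s.length : Int) + j).toNat + 1 < s.length := by
        by_contra hge
        exact hne (List.drop_eq_nil_of_le (by omega))
      have hj1 : j + 1 < 0 := by omega
      refine ih (by omega) hj1 ⟨c', ?_, hmem'⟩
      have heq : ((s.length : Int) + (j + 1)).toNat = ((s.length : Int) + j).toNat + 1 := by omega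
      rw [heq]
      exact hc'
  | case4 j h =>
    intro _ h1 _
    rw [mfFindB_idle s lc stop j h]
    exact h1

-- Main invariant, nonnegative start: A's scan from j equals acc ++ s[j : findB j].
lemma scanA_eq_of_nonneg (s lc : List Char) (lidx : Int) :
    ∀ (j : Int) (acc : List Char), 0 ≤ j →
      mfScanA s lc lidx j acc
        = acc ++ PySem.List.slice s (some j) (some (mfFindB s lc (min (s.length : Int) lidx) j)) := by
  intro j acc
  induction j, acc using mfScanA.induct (s := s) (lc := lc) (lidx := lidx) with
  | case1 j acc h hc =>
    intro hj
    rw [pyGet?_of_lt s j hj (by omega), List.getElem?_eq_getElem (by omega)] at hc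
    simp at hc
  | case2 j acc h c hc hmem =>
    intro _
    rw [mfScanA, dif_pos h, hc]
    simp only [if_pos hmem]
    rw [mfFindB_break s lc _ j c (lt_min h.1 h.2) hc hmem, slice_self, List.append_nil]
  | case3 j acc h c hc hmem ih =>
    intro hj
    rw [mfScanA, dif_pos h, hc]
    simp only [if_neg hmem]
    rw [ih (by omega), mfFindB_step s lc _ j c (lt_min h.1 h.2) hc hmem]
    rw [slice_cons s j _ c hc
      (by have := mfFindB_ge s lc (min (s.length : Int) lidx) (j + 1); omega) (Or.inl hj)]
    simp
  | case4 j acc h =>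
    intro _
    rw [mfScanA, dif_neg h, mfFindB_idle s lc _ j (by rw [lt_min_iff]; exact h),
      slice_self, List.append_nil]

-- Main invariant, negative start, in the two regimes where the scan never crosses index 0:
-- either stop < 0, or a boundary char occurs among the tail positions.
lemma scanA_eq_of_neg (s lc : List Char) (lidx : Int) :
    ∀ (j : Int) (acc : List Char), -(s.length : Int) ≤ j → j ≤ 0 →
      (min (s.length : Int) lidx < 0 ∨ ∃ c ∈ s.drop ((s.length : Int) + j).toNat, c ∈ lc) →
      mfScanA s lc lidx j acc
        = acc ++ PySem.List.slice s (some j) (some (mfFindB s lc (min (s.length : Int) lidx) j)) := by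
  intro j acc
  induction j, acc using mfScanA.induct (s := s) (lc := lc) (lidx := lidx) with
  | case1 j acc h hc =>
    intro h0 h1 _
    rcases lt_or_ge j 0 with hj0 | hj0
    · rw [pyGet?_of_neg s j h0 hj0, List.getElem?_eq_getElem (by omega)] at hc
      simp at hc
    · rw [pyGet?_of_lt s j hj0 (by omega), List.getElem?_eq_getElem (by omega)] at hc
      simp at hc
  | case2 j acc h c hc hmem =>
    intro _ _ _
    rw [mfScanA, dif_pos h, hc]
    simp only [if_pos hmem]
    rw [mfFindB_break s lc _ j c (lt_min h.1 h.2) hc hmem, slice_self, List.append_nil]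
  | case3 j acc h c hc hmem ih =>
    intro h0 h1 hcase
    have hj0 : j < 0 := by
      rcases hcase with hst | ⟨c', hc', _⟩
      · have := lt_min h.1 h.2
        omega
      · by_contra hge
        have hz : j = 0 := by omega
        subst hz
        simp at hc'
    have hkn : ((s.length : Int) + j).toNat < s.length := by omega
    have hcase' : min (s.length : Int) lidx < 0 ∨
        ∃ c' ∈ s.drop ((s.length : Int) + (j + 1)).toNat, c' ∈ lc := by
      rcases hcase with hst | ⟨c', hc', hmem'⟩
      · exact Or.inl hst
      · rw [List.drop_eq_getElem_cons hkn] at hc'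
        rw [pyGet?_of_neg s j h0 hj0, List.getElem?_eq_getElem hkn] at hc
        rcases List.mem_cons.mp hc' with rfl | hc'
        · exact absurd hmem' (by rw [← Option.some_inj.mp hc] at hmem; exact hmem)
        · refine Or.inr ⟨c', ?_, hmem'⟩
          have heq : ((s.length : Int) + (j + 1)).toNat = ((s.length : Int) + j).toNat + 1 := by omega
          rw [heq]
          exact hc'
    have hj1 : j + 1 ≤ 0 := by
      rcases hcase' with hst | ⟨c', hc', _⟩
      · have := lt_min h.1 h.2
        omega
      · by_contra hge
        have hdn : s.length ≤ ((s.length : Int) + (j + 1)).toNat := by omega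
        rw [List.drop_eq_nil_of_le hdn] at hc'
        simp at hc'
    have hmlt : mfFindB s lc (min (s.length : Int) lidx) (j + 1) < 0 := by
      rcases hcase' with hst | hex
      · have := mfFindB_le s lc (min (s.length : Int) lidx) (j + 1) (by have := lt_min h.1 h.2; omega)
        omega
      · have hj1' : j + 1 < 0 := by
          obtain ⟨c', hc', _⟩ := hex
          by_contra hge
          have hdn : s.length ≤ ((s.length : Int) + (j + 1)).toNat := by omega
          rw [List.drop_eq_nil_of_le hdn] at hc'
          simp at hc'
        exact mfFindB_neg s lc (min (s.length : Int) lidx) (j + 1) (by omega) hj1' hex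
    rw [mfScanA, dif_pos h, hc]
    simp only [if_neg hmem]
    rw [ih (by omega) hj1 hcase', mfFindB_step s lc _ j c (lt_min h.1 h.2) hc hmem]
    rw [slice_cons s j _ c hc
      (by have := mfFindB_ge s lc (min (s.length : Int) lidx) (j + 1); omega) (Or.inr hmlt)]
    simp
  | case4 j acc h =>
    intro _ _ _
    rw [mfScanA, dif_neg h, mfFindB_idle s lc _ j (by rw [lt_min_iff]; exact h),
      slice_self, List.append_nil]

-- The number of characters A accumulates equals the distance from the start to B's
-- boundary index (whenever all scanned indices are valid, i.e. -len ≤ j).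
lemma scanA_length (s lc : List Char) (lidx : Int) :
    ∀ (j : Int) (acc : List Char), -(s.length : Int) ≤ j →
      (mfScanA s lc lidx j acc).length
        = acc.length + ((mfFindB s lc (min (s.length : Int) lidx) j) - j).toNat := by
  intro j acc
  induction j, acc using mfScanA.induct (s := s) (lc := lc) (lidx := lidx) with
  | case1 j acc h hc =>
    intro h0
    rcases lt_or_ge j 0 with hj0 | hj0
    · rw [pyGet?_of_neg s j h0 hj0, List.getElem?_eq_getElem (by omega)] at hc
      simp at hc
    · rw [pyGet?_of_lt s j hj0 (by omega), List.getElem?_eq_getElem (by omega)] at hc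
      simp at hc
  | case2 j acc h c hc hmem =>
    intro _
    rw [mfScanA, dif_pos h, hc]
    simp only [if_pos hmem]
    rw [mfFindB_break s lc _ j c (lt_min h.1 h.2) hc hmem]
    omega
  | case3 j acc h c hc hmem ih =>
    intro h0
    rw [mfScanA, dif_pos h, hc]
    simp only [if_neg hmem]
    rw [ih (by omega), mfFindB_step s lc _ j c (lt_min h.1 h.2) hc hmem]
    have := mfFindB_ge s lc (min (s.length : Int) lidx) (j + 1)
    simp only [List.length_append, List.length_cons, List.length_nil]
    omega
  | case4 j acc h =>
    intro _
    rw [mfScanA, dif_neg h, mfFindB_idle s lc _ j (by rw [lt_min_iff]; exact h)]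
    omega

-- When no boundary char occurs among the tail positions and stop ≥ 0, B's search crosses
-- index 0.
lemma mfFindB_nonneg (s lc : List Char) (stop : Int) (hstop : 0 ≤ stop) :
    ∀ j, -(s.length : Int) ≤ j → j < 0 →
      (∀ c ∈ s.drop ((s.length : Int) + j).toNat, c ∉ lc) → 0 ≤ mfFindB s lc stop j := by
  intro j
  induction j using mfFindB.induct (s := s) (lc := lc) (stop := stop) with
  | case1 j h hc =>
    intro h0 h1 _
    rw [pyGet?_of_neg s j h0 h1, List.getElem?_eq_getElem (by omega)] at hc
    simp at hc
  | case2 j h c hc hmem =>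
    intro h0 h1 hclean
    exfalso
    have hkn : ((s.length : Int) + j).toNat < s.length := by omega
    rw [pyGet?_of_neg s j h0 h1, List.getElem?_eq_getElem hkn] at hc
    refine hclean s[((s.length : Int) + j).toNat] ?_ (by rw [Option.some_inj.mp hc]; exact hmem)
    rw [List.drop_eq_getElem_cons hkn]
    exact List.mem_cons_self
  | case3 j h c hc hmem ih =>
    intro h0 h1 hclean
    rw [mfFindB_step s lc stop j c h hc hmem]
    rcases lt_or_ge (j + 1) 0 with hj1 | hj1
    · refine ih (by omega) hj1 ?_
      intro c' hc' hmem'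
      have hkn : ((s.length : Int) + j).toNat < s.length := by omega
      refine hclean c' ?_ hmem'
      rw [List.drop_eq_getElem_cons hkn]
      have heq : ((s.length : Int) + (j + 1)).toNat = ((s.length : Int) + j).toNat + 1 := by omega
      rw [heq] at hc'
      exact List.mem_cons_of_mem _ hc'
    · have := mfFindB_ge s lc stop (j + 1)
      omega
  | case4 j h =>
    intro _ h1 _
    omega

-- ===== VERDICT (by name: the statement is the Claim_ definition above) =====
theorem move_front_spec : Claim_unchanged_move_front := by
  intro s i last_char last_idx _ hpre
  unfold Spec_move_front
  intro hnD
  unfold move_front move_front_alt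
  refine congrArg String.ofList ?_
  by_cases h0 : 0 ≤ i + 1
  · rw [scanA_eq_of_nonneg s.toList last_char.toList last_idx (i + 1) [] h0]
    simp
  · push_neg at h0
    unfold Pre_move_front at hpre
    rcases hpre with hlen | hidx
    · -- -len ≤ i+1 < 0; ¬D gives last_idx < 0 or a boundary char in the tail
      unfold D_move_front at hnD
      push_neg at hnD
      have hcase : min (s.toList.length : Int) last_idx < 0 ∨
          ∃ c ∈ s.toList.drop ((s.toList.length : Int) + (i + 1)).toNat, c ∈ last_char.toList := by
        rcases lt_or_ge last_idx 0 with hL | hL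
        · left
          have := min_le_right (s.toList.length : Int) last_idx
          omega
        · obtain ⟨c, hc, hmem⟩ := hnD hlen h0 hL
          right
          exact ⟨c, hc, by simpa using hmem⟩
      rw [scanA_eq_of_neg s.toList last_char.toList last_idx (i + 1) [] hlen (by omega) hcase]
      simp
    · -- last_idx ≤ i+1 < 0: neither loop runs
      rw [mfScanA, dif_neg (by omega),
        mfFindB_idle _ _ _ _ (by rw [lt_min_iff]; omega), slice_self]

set_option maxRecDepth 100000 in
theorem move_front_changed : Claim_changed_move_front := by
  unfold Claim_changed_move_front pvDiffWitness_move_front pvDiffWitnessOut_move_front D_move_front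
  refine ⟨by decide, by decide,
    ⟨by decide, by decide, by decide, by intro c _; simp⟩, ?_, ?_, by decide⟩
  · simp [move_front, mfScanA,
      PySem.List.pyGet?, PySem.List.pyIdx?]
  · simp [move_front_alt, mfFindB,
      PySem.List.pyGet?, PySem.List.pyIdx?, PySem.List.slice, PySem.List.clampIdx]

theorem move_front_tight : Claim_exact_move_front := by
  intro s i last_char last_idx _ _ hD heq
  unfold D_move_front at hD
  obtain ⟨hlen, h0, hlidx, hclean⟩ := hD
  have hlist : mfScanA s.toList last_char.toList last_idx (i + 1) []
      = PySem.List.slice s.toList (some (i + 1))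
          (some (mfFindB s.toList last_char.toList (min (s.toList.length : Int) last_idx) (i + 1))) := by
    have := congrArg String.toList heq
    simpa [move_front, move_front_alt] using this
  have hL1 : 1 ≤ s.toList.length := by omega
  have hstop : 0 ≤ min (s.toList.length : Int) last_idx := le_min (by omega) hlidx
  have hm0 : 0 ≤ mfFindB s.toList last_char.toList (min (s.toList.length : Int) last_idx) (i + 1) :=
    mfFindB_nonneg s.toList last_char.toList _ hstop (i + 1) hlen h0 hclean
  have hlenA := scanA_length s.toList last_char.toList last_idx (i + 1) [] hlen
  have hlenB := PySem.List.length_slice s.toList (i + 1)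
    (mfFindB s.toList last_char.toList (min (s.toList.length : Int) last_idx) (i + 1))
  have hclS : PySem.List.clampIdx s.toList.length (i + 1)
      = ((s.toList.length : Int) + (i + 1)).toNat := by
    unfold PySem.List.clampIdx
    rw [if_pos h0, if_neg (by omega)]
  have hclM : PySem.List.clampIdx s.toList.length
        (mfFindB s.toList last_char.toList (min (s.toList.length : Int) last_idx) (i + 1))
      = min (mfFindB s.toList last_char.toList (min (s.toList.length : Int) last_idx) (i + 1)).toNat
          s.toList.length := by
    unfold PySem.List.clampIdx
    rw [if_neg (by omega)]
  rw [hlist, hlenB, hclS, hclM] at hlenA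
  omega
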